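-- pv_equiv track=rewrite | github.com/cjchanh/azimuth-bench | benchmarking/socials.py | _frontier_rows
-- ===== SOURCE A (Python) =====
-- from typing import Any
--
-- def _frontier_rows(rows: list[dict[str, Any]]) -> list[dict[str, Any]]:
--     frontier = [row for row in rows if row.get("lane") == "frontier_27b"]
--     if not frontier:
--         raise ValueError("token summary is missing frontier_27b rows")
--     order = {"Qwen3.5 27B Base": 0, "Qwen3.5 27B Opus Distilled v2": 1}
--     think_order = {"off": 0, "on": 1, "default": 2}
--     frontier.sort(
--         key=lambda row: (
--             order.get(str(row.get("display_name")), 99),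
--             think_order.get(str(row.get("thinking_mode")), 99),
--         )
--     )
--     return frontier
-- ===== SOURCE B (Python) =====
-- from typing import Any
--
-- _NAMES = ("Qwen3.5 27B Base", "Qwen3.5 27B Opus Distilled v2")
-- _THINKS = ("off", "on", "default")
--
-- def _rank(value, ordered):
--     try:
--         return ordered.index(value)
--     except ValueError:
--         return len(ordered)
--
-- # Single-pass bucket sort: the sort key only takes 3x4 values, so dropping each row
-- # into one of 12 buckets and concatenating reproduces the stable sorted order.
-- def _frontier_rows(rows: list[dict[str, Any]]) -> list[dict[str, Any]]:
--     frontier = [row for row in rows if row.get("lane") == "frontier_27b"]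
--     if not frontier:
--         raise ValueError("token summary is missing frontier_27b rows")
--     buckets = [[] for _ in range(12)]
--     for row in frontier:
--         nr = _rank(str(row.get("display_name")), _NAMES)
--         tr = _rank(str(row.get("thinking_mode")), _THINKS)
--         buckets[4 * nr + tr].append(row)
--     out = []
--     for bucket in buckets:
--         out += bucket
--     return out
-- ===== Notes on version B (the rewrite author's own statement) =====
-- stated objective: alternative
-- what changed: Replaces the composite-dict-key comparison sort with a single-pass bucket sort: each frontier row is dropped into one of 12 buckets (rank of display name x rank of thinking mode) and the buckets are concatenated in key order, which reproduces the stable sorted order; the ordering dicts are replaced by tuple ranks.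
import Mathlib
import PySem

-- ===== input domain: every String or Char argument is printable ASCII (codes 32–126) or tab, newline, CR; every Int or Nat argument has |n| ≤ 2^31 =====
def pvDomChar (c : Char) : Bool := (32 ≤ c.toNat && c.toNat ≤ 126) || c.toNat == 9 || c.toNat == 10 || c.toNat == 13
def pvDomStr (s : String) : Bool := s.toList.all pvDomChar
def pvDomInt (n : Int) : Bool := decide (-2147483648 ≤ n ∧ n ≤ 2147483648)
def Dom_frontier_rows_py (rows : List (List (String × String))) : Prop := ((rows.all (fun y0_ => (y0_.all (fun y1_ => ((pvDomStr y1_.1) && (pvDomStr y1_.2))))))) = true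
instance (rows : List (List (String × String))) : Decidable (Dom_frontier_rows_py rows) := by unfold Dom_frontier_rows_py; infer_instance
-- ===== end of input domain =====

-- B replaces the composite-key comparison sort with a bucket collect over the 12 possible
-- key values in key order (same stable result); equivalence proved on all inputs with at
-- least one frontier_27b row (elsewhere both Pythons raise ValueError).

-- ===== PORT A =====
-- str(row.get(k)) : a missing key gives "None" (both dicts map it to the 99 default anyway)
def pvStrOpt (o : Option String) : String := match o with | none => "None" | some s => s

def pvOrderDict : PySem.Dict String Int :=
  PySem.Dict.mk [("Qwen3.5 27B Base", 0), ("Qwen3.5 27B Opus Distilled v2", 1)]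

def pvThinkDict : PySem.Dict String Int :=
  PySem.Dict.mk [("off", 0), ("on", 1), ("default", 2)]

def pvK1 (row : List (String × String)) : Int :=
  PySem.Dict.getD pvOrderDict (pvStrOpt (PySem.Dict.get? (PySem.Dict.mk row) "display_name")) 99

def pvK2 (row : List (String × String)) : Int :=
  PySem.Dict.getD pvThinkDict (pvStrOpt (PySem.Dict.get? (PySem.Dict.mk row) "thinking_mode")) 99

def frontier_rows_py (rows : List (List (String × String))) : List (List (String × String)) :=
  let frontier := rows.filter (fun row => PySem.Dict.get? (PySem.Dict.mk row) "lane" == some "frontier_27b")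
  PySem.List.sorted2 frontier pvK1 pvK2 false

-- ===== PORT B =====
def pvNames : List String := ["Qwen3.5 27B Base", "Qwen3.5 27B Opus Distilled v2"]

def pvThinks : List String := ["off", "on", "default"]

-- _rank: ordered.index(value), or len(ordered) when .index raises ValueError
def pvRank (value : String) (ordered : List String) : Int :=
  match PySem.List.index? ordered value with
  | some i => (i : Int)
  | none => PySem.List.len ordered

def frontier_rows_py_alt (rows : List (List (String × String))) : List (List (String × String)) :=
  let frontier := rows.filter (fun row => PySem.Dict.get? (PySem.Dict.mk row) "lane" == some "frontier_27b")
  let buckets := frontier.foldl (fun buckets row =>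
      let nr := pvRank (pvStrOpt (PySem.Dict.get? (PySem.Dict.mk row) "display_name")) pvNames
      let tr := pvRank (pvStrOpt (PySem.Dict.get? (PySem.Dict.mk row) "thinking_mode")) pvThinks
      PySem.List.pySetD buckets (4 * nr + tr)
        (PySem.List.pyGetD buckets (4 * nr + tr) [] ++ [row]))
    (List.replicate 12 [])
  buckets.foldl (fun out bucket => out ++ bucket) []

-- ===== PRECONDITION & SPEC =====
-- Pre_ excludes exactly the inputs with no frontier_27b row, on which A (and B) raise ValueError.
def Pre_frontier_rows_py (rows : List (List (String × String))) : Prop :=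
  rows.any (fun row => PySem.Dict.get? (PySem.Dict.mk row) "lane" == some "frontier_27b") = true
instance (rows : List (List (String × String))) : Decidable (Pre_frontier_rows_py rows) := by
  unfold Pre_frontier_rows_py; infer_instance

def pvWitness_frontier_rows_py : (List (List (String × String))) := [[("lane", "frontier_27b")]]

def Spec_frontier_rows_py (rows : List (List (String × String))) (out : List (List (String × String))) : Prop := out = frontier_rows_py_alt rows
instance (rows : List (List (String × String))) (out : List (List (String × String))) : Decidable (Spec_frontier_rows_py rows out) := by unfold Spec_frontier_rows_py; infer_instance

-- ===== CLAIM (what is proved, stated in full; the proofs are below) =====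
def Claim_equal_frontier_rows_py : Prop := ∀ (rows : List (List (String × String))), Dom_frontier_rows_py rows → Pre_frontier_rows_py rows → Spec_frontier_rows_py rows (frontier_rows_py rows)

-- ===== LEMMAS AND PROOFS =====

-- stable insertion passes over a block of elements it is not 'before'
lemma insertBy_skip {α : Type} (before : α → α → Bool) (x : α) (as bs : List α)
    (h : ∀ y ∈ as, before x y = false) :
    PySem.List.insertBy before x (as ++ bs) = as ++ PySem.List.insertBy before x bs := by
  induction as with
  | nil => rfl
  | cons a as ih =>
    simp only [List.cons_append, PySem.List.insertBy, h a (by simp)]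
    simp only [Bool.false_eq_true, if_false, List.cons.injEq, true_and]
    exact ih (fun y hy => h y (by simp [hy]))

lemma insertBy_front {α : Type} (before : α → α → Bool) (x : α) (bs : List α)
    (h : ∀ y ∈ bs, before x y = true) :
    PySem.List.insertBy before x bs = x :: bs := by
  cases bs with
  | nil => rfl
  | cons b bs => simp [PySem.List.insertBy, h b (by simp)]

-- inserting into a bucket decomposition keeps the bucket decomposition
lemma insertBy_buckets {α : Type} (c : α → Int) (before : α → α → Bool)
    (hb : ∀ a b, before a b = decide (c a < c b)) (ks : List Int)
    (hks : ks.Pairwise (· < ·)) (ys : List α) (x : α) (hx : c x ∈ ks) :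
    PySem.List.insertBy before x (ks.flatMap (fun v => ys.filter (fun y => c y == v)))
      = ks.flatMap (fun v => (ys ++ [x]).filter (fun y => c y == v)) := by
  induction ks with
  | nil => cases hx
  | cons v ks ih =>
    have hvlt : ∀ u ∈ ks, v < u := (List.pairwise_cons.mp hks).1
    simp only [List.flatMap_cons]
    by_cases hxv : c x = v
    · have h1 : ∀ y ∈ ys.filter (fun y => c y == v), before x y = false := by
        intro y hy
        have hcy : c y = v := by simpa using (List.mem_filter.mp hy).2
        rw [hb]
        simp only [decide_eq_false_iff_not, not_lt]
        omega
      have h2 : ∀ y ∈ ks.flatMap (fun v => ys.filter (fun y => c y == v)), before x y = true := by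
        intro y hy
        obtain ⟨u, hu, hyu⟩ := List.mem_flatMap.mp hy
        have hcy : c y = u := by simpa using (List.mem_filter.mp hyu).2
        have := hvlt u hu
        rw [hb]
        simp only [decide_eq_true_eq]
        omega
      rw [insertBy_skip before x _ _ h1, insertBy_front before x _ h2]
      have hbx : (ys ++ [x]).filter (fun y => c y == v) = ys.filter (fun y => c y == v) ++ [x] := by
        simp [List.filter_append, hxv]
      have hrest : ∀ u ∈ ks, (ys ++ [x]).filter (fun y => c y == u) = ys.filter (fun y => c y == u) := by
        intro u hu
        have := hvlt u hu
        simp only [List.filter_append, List.filter_cons, List.filter_nil]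
        have : (c x == u) = false := by simp; omega
        simp [this]
      rw [hbx, List.flatMap_congr hrest]
      simp
    · have hx' : c x ∈ ks := by
        rcases List.mem_cons.mp hx with h | h
        · exact absurd h hxv
        · exact h
      have hvx : v < c x := hvlt _ hx'
      have h1 : ∀ y ∈ ys.filter (fun y => c y == v), before x y = false := by
        intro y hy
        have hcy : c y = v := by simpa using (List.mem_filter.mp hy).2
        rw [hb]
        simp only [decide_eq_false_iff_not, not_lt]
        omega
      rw [insertBy_skip before x _ _ h1,
        ih (List.Pairwise.sublist (List.sublist_cons_self v ks) hks) hx']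
      -- the head bucket of ys is the head bucket of ys ++ [x]
      have hbv : (ys ++ [x]).filter (fun y => c y == v) = ys.filter (fun y => c y == v) := by
        simp only [List.filter_append, List.filter_cons, List.filter_nil]
        have : (c x == v) = false := by simp; omega
        simp [this]
      rw [hbv]

lemma foldl_insertBy_buckets {α : Type} (c : α → Int) (before : α → α → Bool)
    (hb : ∀ a b, before a b = decide (c a < c b)) (ks : List Int)
    (hks : ks.Pairwise (· < ·)) :
    ∀ (xs ys : List α), (∀ x ∈ xs, c x ∈ ks) →
      xs.foldl (fun acc x => PySem.List.insertBy before x acc)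
          (ks.flatMap (fun v => ys.filter (fun y => c y == v)))
        = ks.flatMap (fun v => (ys ++ xs).filter (fun y => c y == v)) := by
  intro xs
  induction xs with
  | nil => intro ys _; simp
  | cons x xs ih =>
    intro ys hmem
    rw [List.foldl_cons, insertBy_buckets c before hb ks hks ys x (hmem x (by simp)),
      ih (ys ++ [x]) (fun z hz => hmem z (by simp [hz]))]
    simp

lemma pvK1_range (row : List (String × String)) : pvK1 row = 0 ∨ pvK1 row = 1 ∨ pvK1 row = 99 := by
  unfold pvK1 pvOrderDict
  simp only [PySem.Dict.getD_eq_get?_getD, PySem.Dict.get?_mk_cons]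
  split_ifs <;> simp [PySem.Dict.get?]

lemma pvK2_range (row : List (String × String)) :
    pvK2 row = 0 ∨ pvK2 row = 1 ∨ pvK2 row = 2 ∨ pvK2 row = 99 := by
  unfold pvK2 pvThinkDict
  simp only [PySem.Dict.getD_eq_get?_getD, PySem.Dict.get?_mk_cons]
  split_ifs <;> simp [PySem.Dict.get?]

-- lexicographic comparison of the (k1, k2) tuple is comparison of 100*k1 + k2 when 0 ≤ k2 ≤ 99
lemma lex_eq_combined (x1 x2 y1 y2 : Int) (hx : 0 ≤ x2 ∧ x2 ≤ 99) (hy : 0 ≤ y2 ∧ y2 ≤ 99) :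
    (decide (x1 < y1) || (!decide (y1 < x1) && decide (x2 < y2)))
      = decide (100 * x1 + x2 < 100 * y1 + y2) := by
  by_cases h1 : x1 < y1 <;> by_cases h2 : y1 < x1 <;> by_cases h3 : x2 < y2 <;>
    simp [h1, h2, h3] <;> omega

def pvCKey (row : List (String × String)) : Int := 100 * pvK1 row + pvK2 row

def pvKs : List Int := [0, 1, 2, 99, 100, 101, 102, 199, 9900, 9901, 9902, 9999]

lemma pvCKey_mem (row : List (String × String)) : pvCKey row ∈ pvKs := by
  unfold pvCKey pvKs
  rcases pvK1_range row with h | h | h <;> rcases pvK2_range row with g | g | g | g <;>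
    rw [h, g] <;> decide

lemma pvHb (a b : List (String × String)) :
    (decide (pvK1 a < pvK1 b) || (!decide (pvK1 b < pvK1 a) && decide (pvK2 a < pvK2 b)))
      = decide (pvCKey a < pvCKey b) := by
  apply lex_eq_combined
  · rcases pvK2_range a with h | h | h | h <;> rw [h] <;> constructor <;> norm_num
  · rcases pvK2_range b with h | h | h | h <;> rw [h] <;> constructor <;> norm_num

def pvIdx (row : List (String × String)) : Int :=
  4 * pvRank (pvStrOpt (PySem.Dict.get? (PySem.Dict.mk row) "display_name")) pvNames
    + pvRank (pvStrOpt (PySem.Dict.get? (PySem.Dict.mk row) "thinking_mode")) pvThinks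

-- the rank of the display name against pvNames and the pvOrderDict lookup, jointly
lemma pvNR (row : List (String × String)) :
    (pvRank (pvStrOpt (PySem.Dict.get? (PySem.Dict.mk row) "display_name")) pvNames = 0 ∧ pvK1 row = 0)
    ∨ (pvRank (pvStrOpt (PySem.Dict.get? (PySem.Dict.mk row) "display_name")) pvNames = 1 ∧ pvK1 row = 1)
    ∨ (pvRank (pvStrOpt (PySem.Dict.get? (PySem.Dict.mk row) "display_name")) pvNames = 2 ∧ pvK1 row = 99) := by
  unfold pvK1 pvOrderDict pvRank pvNames
  generalize pvStrOpt (PySem.Dict.get? (PySem.Dict.mk row) "display_name") = s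
  by_cases h1 : s = "Qwen3.5 27B Base"
  · left; subst h1; exact ⟨by decide, by decide⟩
  by_cases h2 : s = "Qwen3.5 27B Opus Distilled v2"
  · right; left; subst h2; exact ⟨by decide, by decide⟩
  · right; right
    have hn : List.idxOf? s ["Qwen3.5 27B Base", "Qwen3.5 27B Opus Distilled v2"] = none := by
      simp [List.idxOf?_eq_none_iff, h1, h2]
    constructor
    · simp [PySem.List.index?, hn, PySem.List.len]
    · simp [PySem.Dict.getD_eq_get?_getD, PySem.Dict.get?,
        Ne.symm h1, Ne.symm h2]

lemma pvTR (row : List (String × String)) :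
    (pvRank (pvStrOpt (PySem.Dict.get? (PySem.Dict.mk row) "thinking_mode")) pvThinks = 0 ∧ pvK2 row = 0)
    ∨ (pvRank (pvStrOpt (PySem.Dict.get? (PySem.Dict.mk row) "thinking_mode")) pvThinks = 1 ∧ pvK2 row = 1)
    ∨ (pvRank (pvStrOpt (PySem.Dict.get? (PySem.Dict.mk row) "thinking_mode")) pvThinks = 2 ∧ pvK2 row = 2)
    ∨ (pvRank (pvStrOpt (PySem.Dict.get? (PySem.Dict.mk row) "thinking_mode")) pvThinks = 3 ∧ pvK2 row = 99) := by
  unfold pvK2 pvThinkDict pvRank pvThinks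
  generalize pvStrOpt (PySem.Dict.get? (PySem.Dict.mk row) "thinking_mode") = s
  by_cases h1 : s = "off"
  · left; subst h1; exact ⟨by decide, by decide⟩
  by_cases h2 : s = "on"
  · right; left; subst h2; exact ⟨by decide, by decide⟩
  by_cases h3 : s = "default"
  · right; right; left; subst h3; exact ⟨by decide, by decide⟩
  · right; right; right
    have hn : List.idxOf? s ["off", "on", "default"] = none := by
      simp [List.idxOf?_eq_none_iff, h1, h2, h3]
    constructor
    · simp [PySem.List.index?, hn, PySem.List.len]
    · simp [PySem.Dict.getD_eq_get?_getD, PySem.Dict.get?,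
        Ne.symm h1, Ne.symm h2, Ne.symm h3]

lemma pvIdx_range (row : List (String × String)) : 0 ≤ pvIdx row ∧ (pvIdx row).toNat < 12 := by
  unfold pvIdx
  rcases pvNR row with ⟨h1, -⟩ | ⟨h1, -⟩ | ⟨h1, -⟩ <;>
    rcases pvTR row with ⟨g1, -⟩ | ⟨g1, -⟩ | ⟨g1, -⟩ | ⟨g1, -⟩ <;> rw [h1, g1] <;> decide

-- invariant of the bucket loop: bucket j collects exactly the elements with index j, in order
lemma foldl_bucket {α : Type} (idx : α → Int) (xs : List α) :
    ∀ (bs : List (List α)), (∀ x, 0 ≤ idx x ∧ (idx x).toNat < bs.length) →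
      (xs.foldl (fun bs x =>
          PySem.List.pySetD bs (idx x) (PySem.List.pyGetD bs (idx x) [] ++ [x])) bs).length = bs.length
      ∧ ∀ j : Nat, (xs.foldl (fun bs x =>
          PySem.List.pySetD bs (idx x) (PySem.List.pyGetD bs (idx x) [] ++ [x])) bs)[j]?
        = (bs[j]?).map (fun b => b ++ xs.filter (fun x => idx x == (j : Int))) := by
  induction xs with
  | nil =>
    intro bs _
    refine ⟨rfl, fun j => ?_⟩
    cases h : bs[j]? <;> simp [h]
  | cons x xs ih =>
    intro bs hidx
    have hx := hidx x
    have hset : PySem.List.pySetD bs (idx x) (PySem.List.pyGetD bs (idx x) [] ++ [x])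
        = bs.set (idx x).toNat (bs[(idx x).toNat] ++ [x]) := by
      rw [PySem.List.pySetD_of_nonneg _ _ hx.1,
        PySem.List.pyGetD_eq_getElem _ _ hx.1 (by omega)]
    have hlen : (bs.set (idx x).toNat (bs[(idx x).toNat] ++ [x])).length = bs.length := by
      simp
    have hidx' : ∀ y, 0 ≤ idx y ∧ (idx y).toNat < (bs.set (idx x).toNat (bs[(idx x).toNat] ++ [x])).length := by
      intro y; rw [hlen]; exact hidx y
    obtain ⟨ihlen, ihget⟩ := ih _ hidx'
    simp only [List.foldl_cons, hset]
    refine ⟨by rw [ihlen, hlen], fun j => ?_⟩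
    rw [ihget j, List.getElem?_set]
    by_cases hj : (idx x).toNat = j
    · subst hj
      have htrue : (idx x == ((idx x).toNat : Int)) = true := by
        simp [Int.toNat_of_nonneg hx.1]
      simp [if_pos hx.2, List.getElem?_eq_getElem hx.2, List.filter_cons]
      exact hx.1
    · have hfalse : (idx x == (j : Int)) = false := by
        simp only [beq_eq_false_iff_ne, ne_eq]
        intro he
        apply hj
        omega
      simp [hj, hfalse]

lemma filter_idx_eq (l : List (List (String × String))) (jn jt k1v k2v j v : Int)
    (hj : j = 4 * jn + jt) (hv : v = 100 * k1v + k2v)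
    (hn : (jn, k1v) ∈ ([(0, 0), (1, 1), (2, 99)] : List (Int × Int)))
    (ht : (jt, k2v) ∈ ([(0, 0), (1, 1), (2, 2), (3, 99)] : List (Int × Int))) :
    l.filter (fun x => pvIdx x == j) = l.filter (fun y => pvCKey y == v) := by
  apply List.filter_congr
  intro x _
  subst hj hv
  simp only [List.mem_cons, List.not_mem_nil, or_false, Prod.mk.injEq] at hn ht
  unfold pvIdx pvCKey
  rw [Bool.eq_iff_iff]
  simp only [beq_iff_eq]
  rcases pvNR x with ⟨h1, h2⟩ | ⟨h1, h2⟩ | ⟨h1, h2⟩ <;>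
    rcases pvTR x with ⟨g1, g2⟩ | ⟨g1, g2⟩ | ⟨g1, g2⟩ | ⟨g1, g2⟩ <;>
      rw [h1, g1, h2, g2] <;> rcases hn with ⟨e1, e2⟩ | ⟨e1, e2⟩ | ⟨e1, e2⟩ <;>
        rcases ht with ⟨f1, f2⟩ | ⟨f1, f2⟩ | ⟨f1, f2⟩ | ⟨f1, f2⟩ <;> subst e1 e2 f1 f2 <;> omega

-- ===== VERDICT (by name: the statement is the Claim_ definition above) =====
theorem frontier_rows_py_spec : Claim_equal_frontier_rows_py := by
  intro rows _ _
  unfold Spec_frontier_rows_py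
  set frontier := rows.filter
    (fun row => PySem.Dict.get? (PySem.Dict.mk row) "lane" == some "frontier_27b") with hf
  -- A-side: the stable insertion sort produces the bucket decomposition over pvKs
  have hA : frontier_rows_py rows
      = pvKs.flatMap (fun v => frontier.filter (fun y => pvCKey y == v)) := by
    show frontier.foldl (fun acc x => PySem.List.insertBy
        (fun a b => decide (pvK1 a < pvK1 b) ||
          (!decide (pvK1 b < pvK1 a) && decide (pvK2 a < pvK2 b))) x acc) [] = _
    have h1 : ([] : List (List (String × String)))
        = pvKs.flatMap (fun v => ([] : List (List (String × String))).filter (fun y => pvCKey y == v)) := by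
      simp
    rw [h1, foldl_insertBy_buckets pvCKey _ pvHb pvKs (by unfold pvKs; decide) frontier []
      (fun x _ => pvCKey_mem x)]
    simp
  -- B-side: the bucket loop fills bucket j with exactly the rows of index j, in order
  obtain ⟨-, hget⟩ := foldl_bucket pvIdx frontier (List.replicate 12 [])
    (fun x => by have := pvIdx_range x; simpa using this)
  have hB : frontier.foldl (fun bs x =>
        PySem.List.pySetD bs (pvIdx x) (PySem.List.pyGetD bs (pvIdx x) [] ++ [x]))
      (List.replicate 12 [])
      = (List.range 12).map (fun (j : Nat) => frontier.filter (fun x => pvIdx x == (j : Int))) := by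
    apply List.ext_getElem?
    intro j
    rw [hget j]
    by_cases hj : j < 12
    · rw [List.getElem?_replicate, if_pos hj, List.getElem?_map, List.getElem?_range hj]
      simp
    · rw [List.getElem?_replicate, if_neg hj, List.getElem?_map,
        List.getElem?_eq_none (by simp; omega)]
      rfl
  have halt : frontier_rows_py_alt rows
      = (List.range 12).flatMap (fun (j : Nat) => frontier.filter (fun x => pvIdx x == (j : Int))) := by
    show (frontier.foldl (fun bs x =>
        PySem.List.pySetD bs (pvIdx x) (PySem.List.pyGetD bs (pvIdx x) [] ++ [x]))
      (List.replicate 12 [])).foldl (fun out bucket => out ++ bucket) [] = _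
    rw [hB, PySem.List.foldl_append_eq_flatten, ← List.flatMap_def, List.nil_append]
  rw [hA, halt]
  have hr : List.range 12 = [0, 1, 2, 3, 4, 5, 6, 7, 8, 9, 10, 11] := by decide
  rw [hr]
  unfold pvKs
  simp only [List.flatMap_cons, List.flatMap_nil, List.append_nil,
    Nat.cast_ofNat, Nat.cast_zero, Nat.cast_one]
  rw [filter_idx_eq frontier 0 0 0 0 0 0 (by norm_num) (by norm_num) (by decide) (by decide),
    filter_idx_eq frontier 0 1 0 1 1 1 (by norm_num) (by norm_num) (by decide) (by decide),
    filter_idx_eq frontier 0 2 0 2 2 2 (by norm_num) (by norm_num) (by decide) (by decide),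
    filter_idx_eq frontier 0 3 0 99 3 99 (by norm_num) (by norm_num) (by decide) (by decide),
    filter_idx_eq frontier 1 0 1 0 4 100 (by norm_num) (by norm_num) (by decide) (by decide),
    filter_idx_eq frontier 1 1 1 1 5 101 (by norm_num) (by norm_num) (by decide) (by decide),
    filter_idx_eq frontier 1 2 1 2 6 102 (by norm_num) (by norm_num) (by decide) (by decide),
    filter_idx_eq frontier 1 3 1 99 7 199 (by norm_num) (by norm_num) (by decide) (by decide),
    filter_idx_eq frontier 2 0 99 0 8 9900 (by norm_num) (by norm_num) (by decide) (by decide),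
    filter_idx_eq frontier 2 1 99 1 9 9901 (by norm_num) (by norm_num) (by decide) (by decide),
    filter_idx_eq frontier 2 2 99 2 10 9902 (by norm_num) (by norm_num) (by decide) (by decide),
    filter_idx_eq frontier 2 3 99 99 11 9999 (by norm_num) (by norm_num) (by decide) (by decide)]
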